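-- pv_equiv track=rewrite | github.com/nexi-lab/nexus | src/nexus/bricks/parsers/md_structure.py | _byte_to_line
-- ===== SOURCE A (Python) =====
-- def _byte_to_line(byte_offset: int, line_offsets: list[int]) -> int:
--     """Convert a byte offset to a 0-indexed line number (binary search)."""
--     lo, hi = 0, len(line_offsets) - 1
--     while lo < hi:
--         mid = (lo + hi + 1) // 2
--         if line_offsets[mid] <= byte_offset:
--             lo = mid
--         else:
--             hi = mid - 1
--     return lo
-- ===== SOURCE B (Python) =====
-- def _byte_to_line(byte_offset: int, line_offsets: list[int]) -> int:
--     """Convert a byte offset to a 0-indexed line number (linear scan)."""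
--     line = 0
--     for i, off in enumerate(line_offsets):
--         if off <= byte_offset:
--             line = i
--     return line
-- ===== Notes on version B (the rewrite author's own statement) =====
-- stated objective: simpler
-- what changed: Replaced the index-juggling binary search with a single linear pass that remembers the last line offset not exceeding the byte offset; Pre_ excludes lists where an offset <= byte_offset follows one > byte_offset (impossible for sorted line-start offsets), on which the binary search's answer is an accident of its probes.
-- outside the precondition, e.g. on _byte_to_line(5, [0, 10, 3]): A returns 0, B returns 2
import Mathlib
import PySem

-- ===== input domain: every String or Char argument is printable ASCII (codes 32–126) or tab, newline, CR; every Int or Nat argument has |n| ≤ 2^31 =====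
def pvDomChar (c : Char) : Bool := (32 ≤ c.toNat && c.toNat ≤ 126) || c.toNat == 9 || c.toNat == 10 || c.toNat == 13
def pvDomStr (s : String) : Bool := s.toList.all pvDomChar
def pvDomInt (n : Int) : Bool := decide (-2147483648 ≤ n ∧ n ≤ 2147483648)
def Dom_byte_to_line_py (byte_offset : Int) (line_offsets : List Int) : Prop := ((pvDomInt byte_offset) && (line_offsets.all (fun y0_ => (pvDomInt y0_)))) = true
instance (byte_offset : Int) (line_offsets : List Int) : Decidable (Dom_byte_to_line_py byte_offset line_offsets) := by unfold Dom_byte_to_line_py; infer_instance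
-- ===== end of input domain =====

-- B replaces A's binary search by a single linear scan keeping the last offset ≤ byte_offset;
-- equal whenever the offsets ≤ byte_offset form a prefix of the list (guaranteed by the sorted contract).

-- ===== PORT A =====
-- the while-loop of A: lo, hi evolve exactly as in the Python; the `none` arm of pyGet? is
-- unreachable on A's reachable states (0 ≤ lo < hi ≤ len-1 keeps mid in range, so Python never raises)
def pvALoop (byte_offset : Int) (line_offsets : List Int) (lo hi : Int) : Int :=
  if _h : lo < hi then
    let mid := PySem.Int.floordiv (lo + hi + 1) 2
    match PySem.List.pyGet? line_offsets mid with
    | some v =>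
        if v ≤ byte_offset then pvALoop byte_offset line_offsets mid hi
        else pvALoop byte_offset line_offsets lo (mid - 1)
    | none => lo
  else lo
termination_by (hi - lo).toNat
decreasing_by
  all_goals
    have hb := PySem.Int.floordiv_two_mid_bounds (lo := lo + 1) (hi := hi) (by omega)
    have : lo + 1 + hi = lo + hi + 1 := by ring
    rw [this] at hb
    omega

def byte_to_line_py (byte_offset : Int) (line_offsets : List Int) : Int :=
  pvALoop byte_offset line_offsets 0 ((line_offsets.length : Int) - 1)

-- ===== PORT B =====
def byte_to_line_py_alt (byte_offset : Int) (line_offsets : List Int) : Int :=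
  (PySem.List.enumerate line_offsets 0).foldl
    (fun line p => if p.2 ≤ byte_offset then p.1 else line) 0

-- ===== PRECONDITION & SPEC =====
-- Pre_ excludes lists in which some offset ≤ byte_offset follows an offset > byte_offset (impossible
-- under the sorted contract for line-start offsets); there the binary search's answer is an accident of its probes.
def Pre_byte_to_line_py (byte_offset : Int) (line_offsets : List Int) : Prop :=
  line_offsets.Pairwise (fun a b => b ≤ byte_offset → a ≤ byte_offset)
instance (byte_offset : Int) (line_offsets : List Int) : Decidable (Pre_byte_to_line_py byte_offset line_offsets) := by unfold Pre_byte_to_line_py; infer_instance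

def pvWitness_byte_to_line_py : Int × List Int := (7, [0, 3, 8, 8, 12])

def Spec_byte_to_line_py (byte_offset : Int) (line_offsets : List Int) (out : Int) : Prop := out = byte_to_line_py_alt byte_offset line_offsets
instance (byte_offset : Int) (line_offsets : List Int) (out : Int) : Decidable (Spec_byte_to_line_py byte_offset line_offsets out) := by unfold Spec_byte_to_line_py; infer_instance

-- ===== CLAIM (what is proved, stated in full; the proofs are below) =====
def Claim_equal_byte_to_line_py : Prop := ∀ (byte_offset : Int) (line_offsets : List Int), Dom_byte_to_line_py byte_offset line_offsets → Pre_byte_to_line_py byte_offset line_offsets → Spec_byte_to_line_py byte_offset line_offsets (byte_to_line_py byte_offset line_offsets)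

-- ===== LEMMAS AND PROOFS =====

-- B's fold returns its accumulator when every element is past byte_offset
lemma pvFold_none (bo : Int) (xs : List Int) (s acc : Int)
    (hall : ∀ (j : Nat) (hj : j < xs.length), bo < xs[j]) :
    (PySem.List.enumerate xs s).foldl (fun line p => if p.2 ≤ bo then p.1 else line) acc = acc := by
  induction xs generalizing s acc with
  | nil => simp [PySem.List.enumerate_nil]
  | cons x xs ih =>
      rw [PySem.List.enumerate_cons, List.foldl_cons]
      have hx : bo < x := hall 0 (by simp)
      simp only [not_le.mpr hx]
      exact ih (s + 1) acc (fun j hj => hall (j + 1) (by simpa using hj))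

-- B's fold returns s + k when index k is the last one with xs[k] ≤ byte_offset
lemma pvFold_last (bo : Int) (xs : List Int) (s acc : Int) (k : Nat)
    (hk : k < xs.length) (hle : xs[k] ≤ bo)
    (hgt : ∀ (j : Nat) (hj : j < xs.length), k < j → bo < xs[j]) :
    (PySem.List.enumerate xs s).foldl (fun line p => if p.2 ≤ bo then p.1 else line) acc
      = s + (k : Int) := by
  induction xs generalizing s acc k with
  | nil => simp at hk
  | cons x xs ih =>
      rw [PySem.List.enumerate_cons, List.foldl_cons]
      cases k with
      | zero =>
          have hx : x ≤ bo := by simpa using hle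
          simp only [if_pos hx]
          have := pvFold_none bo xs (s + 1) s
            (fun j hj => by
              have := hgt (j + 1) (by simpa using hj) (Nat.succ_pos j)
              simpa using this)
          simpa using this
      | succ k' =>
          have hk' : k' < xs.length := by simpa using hk
          have hle' : xs[k'] ≤ bo := by simpa using hle
          have h := ih (s + 1) (if x ≤ bo then s else acc) k' hk' hle'
            (fun j hj hlt => by
              have := hgt (j + 1) (by simpa using hj) (by omega)
              simpa using this)
          rw [h]; push_cast; ring

-- the loop invariant of A's binary search, and its agreement with B's scan
lemma pvLoop_eq (bo : Int) (xs : List Int)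
    (hs : xs.Pairwise (fun a b => b ≤ bo → a ≤ bo)) :
    ∀ (n : Nat) (lo hi : Int), (hi - lo).toNat ≤ n →
      0 ≤ lo → lo ≤ hi → hi ≤ (xs.length : Int) - 1 →
      (∀ (j : Nat) (hj : j < xs.length), hi < (j : Int) → bo < xs[j]) →
      (lo = 0 ∨ ∃ hl : lo.toNat < xs.length, xs[lo.toNat] ≤ bo) →
      pvALoop bo xs lo hi = byte_to_line_py_alt bo xs := by
  intro n
  induction n with
  | zero =>
      intro lo hi hn h0 hlh hhi hinv1 hinv2
      have heq : lo = hi := by omega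
      subst heq
      rw [pvALoop]
      simp only [lt_irrefl, dite_false]
      have hlen : lo.toNat < xs.length := by omega
      rcases hinv2 with h02 | ⟨_, hle⟩
      · subst h02
        by_cases hx : xs[(0:Int).toNat] ≤ bo
        · have := pvFold_last bo xs 0 0 0 (by simpa using hlen) (by simpa using hx)
            (fun j hj hlt => hinv1 j hj (by exact_mod_cast hlt))
          unfold byte_to_line_py_alt
          simpa using this.symm
        · have := pvFold_none bo xs 0 0 (fun j hj => by
            cases j with
            | zero => exact lt_of_not_ge (by simpa using hx)
            | succ j' => exact hinv1 (j' + 1) hj (by push_cast; omega))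
          unfold byte_to_line_py_alt
          simpa using this.symm
      · have := pvFold_last bo xs 0 0 lo.toNat hlen hle
          (fun j hj hlt => hinv1 j hj (by omega))
        unfold byte_to_line_py_alt
        rw [this]; omega
  | succ n ih =>
      intro lo hi hn h0 hlh hhi hinv1 hinv2
      by_cases hlt : lo < hi
      · rw [pvALoop]
        simp only [hlt, dite_true]
        have hb := PySem.Int.floordiv_two_mid_bounds (lo := lo + 1) (hi := hi) (by omega)
        have hre : lo + 1 + hi = lo + hi + 1 := by ring
        rw [hre] at hb
        set mid := PySem.Int.floordiv (lo + hi + 1) 2 with hmid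
        have hmid0 : 0 ≤ mid := by omega
        have hmidlt : mid < (xs.length : Int) := by omega
        have hget : PySem.List.pyGet? xs mid = some xs[mid.toNat] := by
          exact PySem.List.pyGet?_eq_some_getElem xs hmid0 hmidlt
        rw [hget]
        by_cases hv : xs[mid.toNat] ≤ bo
        · simp only [if_pos hv]
          exact ih mid hi (by omega) (by omega) (by omega) hhi hinv1
            (Or.inr ⟨by omega, hv⟩)
        · simp only [if_neg hv]
          refine ih lo (mid - 1) (by omega) h0 (by omega) (by omega) ?_ hinv2
          intro j hj hji
          by_cases hjm : (j : Int) = mid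
          · have : j = mid.toNat := by omega
            subst this
            exact lt_of_not_ge hv
          · by_cases hjhi : hi < (j : Int)
            · exact hinv1 j hj hjhi
            · have hmj : mid.toNat < j := by omega
              by_contra hc
              exact hv ((List.pairwise_iff_getElem.mp hs) mid.toNat j
                (Nat.lt_trans hmj hj) hj hmj (le_of_not_gt hc))
      · have heq : lo = hi := by omega
        subst heq
        exact ih lo lo (by omega) h0 le_rfl hhi hinv1 hinv2

-- ===== VERDICT (by name: the statement is the Claim_ definition above) =====
theorem byte_to_line_py_spec : Claim_equal_byte_to_line_py := by
  intro bo xs _hdom hpre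
  unfold Spec_byte_to_line_py byte_to_line_py
  by_cases hx : xs = []
  · subst hx
    rw [pvALoop]
    simp [byte_to_line_py_alt, PySem.List.enumerate_nil]
  · have hlen : 1 ≤ xs.length := List.length_pos_iff.mpr hx
    exact pvLoop_eq bo xs hpre ((xs.length : Int) - 1).toNat 0 ((xs.length : Int) - 1)
      (by omega) le_rfl (by omega) le_rfl
      (fun j hj hji => absurd hji (by omega))
      (Or.inl rfl)
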